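-- pv_equiv track=rewrite | github.com/daniel-mf-92/temple-sanhedrin | audits/trends/2026-05-02-retro-current-branch-coverage-drift.py | streaks
-- ===== SOURCE A (Python) =====
-- def streaks(commits: list[dict[str, object]], reports: set[str]) -> tuple[int, int, int]:
--     newest_streak = 0
--     longest_gap = 0
--     current_gap = 0
--     audited_after_gap = 0
--
--     for commit in commits:
--         if commit["sha"] in reports:
--             if current_gap > longest_gap:
--                 longest_gap = current_gap
--             current_gap = 0
--             audited_after_gap += 1
--         else:
--             current_gap += 1
--             if audited_after_gap == 0:
--                 newest_streak += 1
--
--     return newest_streak, max(longest_gap, current_gap), audited_after_gap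
-- ===== SOURCE B (Python) =====
-- def streaks(commits: list[dict[str, object]], reports: set[str]) -> tuple[int, int, int]:
--     # Decomposed into independent passes over a precomputed audited-flag list.
--     flags = [commit["sha"] in reports for commit in commits]
--     newest_streak = flags.index(True) if True in flags else len(flags)
--     audited_after_gap = sum(flags)
--     longest_gap = 0
--     cur = 0
--     for f in flags:
--         cur = 0 if f else cur + 1
--         longest_gap = max(longest_gap, cur)
--     return newest_streak, longest_gap, audited_after_gap
-- ===== Notes on version B (the rewrite author's own statement) =====
-- stated objective: simpler
-- what changed: Replaces A's single fused loop over four interacting counters with a precomputed audited-flag list and three independent passes: newest_streak as the index of the first audited flag, audited_after_gap as a sum, and the longest gap via a max-updated-every-step run counter.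
import Mathlib
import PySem

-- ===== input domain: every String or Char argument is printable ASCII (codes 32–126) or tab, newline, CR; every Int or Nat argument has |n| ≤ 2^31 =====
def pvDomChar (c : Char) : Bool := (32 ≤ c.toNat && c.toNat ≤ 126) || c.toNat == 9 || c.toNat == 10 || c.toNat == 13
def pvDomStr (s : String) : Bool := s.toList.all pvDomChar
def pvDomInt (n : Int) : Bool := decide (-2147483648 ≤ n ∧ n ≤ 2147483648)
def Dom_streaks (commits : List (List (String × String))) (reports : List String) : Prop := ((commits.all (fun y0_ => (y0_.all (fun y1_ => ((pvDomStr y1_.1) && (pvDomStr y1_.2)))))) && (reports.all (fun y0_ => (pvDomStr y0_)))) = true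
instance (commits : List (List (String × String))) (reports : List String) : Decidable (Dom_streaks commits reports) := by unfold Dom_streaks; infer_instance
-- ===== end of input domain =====

-- B replaces A's single fused four-counter loop by a precomputed audited-flag list and three
-- independent passes (index of first audited flag, a count, and a max-every-step run counter):
-- objective: simpler decomposition, same O(n) cost.

-- ===== PORT A =====
-- commit["sha"] in reports; the .getD "" default is never reached inside Pre_streaks
-- (Pre_ requires every commit to carry a "sha" key; Python raises KeyError otherwise).
def pvAud (reports : List String) (c : List (String × String)) : Bool :=
  reports.contains ((PySem.Dict.get? (PySem.Dict.mk c) "sha").getD "")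

-- one iteration of A's loop; state = (newest_streak, longest_gap, current_gap, audited_after_gap)
def streaksStep (s : Int × Int × Int × Int) (f : Bool) : Int × Int × Int × Int :=
  if f then
    (s.1, if s.2.2.1 > s.2.1 then s.2.2.1 else s.2.1, 0, s.2.2.2 + 1)
  else
    (if s.2.2.2 = 0 then s.1 + 1 else s.1, s.2.1, s.2.2.1 + 1, s.2.2.2)

def streaks (commits : List (List (String × String))) (reports : List String) : Int × Int × Int :=
  let s := commits.foldl (fun s c => streaksStep s (pvAud reports c)) (0, 0, 0, 0)
  (s.1, max s.2.1 s.2.2.1, s.2.2.2)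

-- ===== PORT B =====
-- one iteration of B's longest-gap pass; state = (longest_gap, cur)
def pvGapStep (p : Int × Int) (f : Bool) : Int × Int :=
  let cur := if f then 0 else p.2 + 1
  (max p.1 cur, cur)

def streaks_alt (commits : List (List (String × String))) (reports : List String) : Int × Int × Int :=
  let flags := commits.map (pvAud reports)
  let newest : Int := if flags.contains true then (((PySem.List.index? flags true).getD 0 : Nat) : Int) else (flags.length : Int)
  let audited : Int := (flags.count true : Int)
  let longest := (flags.foldl pvGapStep (0, 0)).1
  (newest, longest, audited)

-- ===== PRECONDITION & SPEC =====
-- Pre_ excludes exactly the commits lacking a "sha" key, on which Python A raises KeyError.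
def Pre_streaks (commits : List (List (String × String))) (reports : List String) : Prop :=
  ∀ c ∈ commits, (PySem.Dict.get? (PySem.Dict.mk c) "sha").isSome = true
instance (commits : List (List (String × String))) (reports : List String) : Decidable (Pre_streaks commits reports) := by unfold Pre_streaks; infer_instance

def pvWitness_streaks : (List (List (String × String))) × List String :=
  ([[("sha", "a")], [("sha", "b")]], ["b"])

def Spec_streaks (commits : List (List (String × String))) (reports : List String) (out : Int × Int × Int) : Prop := out = streaks_alt commits reports
instance (commits : List (List (String × String))) (reports : List String) (out : Int × Int × Int) : Decidable (Spec_streaks commits reports out) := by unfold Spec_streaks; infer_instance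

-- ===== CLAIM (what is proved, stated in full; the proofs are below) =====
def Claim_equal_streaks : Prop := ∀ (commits : List (List (String × String))) (reports : List String), Dom_streaks commits reports → Pre_streaks commits reports → Spec_streaks commits reports (streaks commits reports)

-- ===== LEMMAS AND PROOFS =====

-- Longest run of `false` flags, with a pending run of length cg already open.
def pvGapM (cg : Int) : List Bool → Int
  | [] => cg
  | f :: t => if f then max cg (pvGapM 0 t) else pvGapM (cg + 1) t

theorem pvGapM_le (l : List Bool) : ∀ cg : Int, cg ≤ pvGapM cg l := by
  induction l with
  | nil => intro cg; simp [pvGapM]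
  | cons f t ih =>
    intro cg
    cases f with
    | true => simp [pvGapM]
    | false =>
      simp only [pvGapM, Bool.false_eq_true, if_false]
      exact le_trans (by omega) (ih (cg + 1))

-- A's fused loop, characterised component-wise.
theorem streaksStep_true (s : Int × Int × Int × Int) :
    streaksStep s true = (s.1, if s.2.2.1 > s.2.1 then s.2.2.1 else s.2.1, 0, s.2.2.2 + 1) := rfl

theorem streaksStep_false (s : Int × Int × Int × Int) :
    streaksStep s false = (if s.2.2.2 = 0 then s.1 + 1 else s.1, s.2.1, s.2.2.1 + 1, s.2.2.2) := rfl

theorem pvGapStep_true (p : Int × Int) : pvGapStep p true = (max p.1 0, 0) := rfl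

theorem pvGapStep_false (p : Int × Int) : pvGapStep p false = (max p.1 (p.2 + 1), p.2 + 1) := rfl

theorem streaks_foldl_eq (l : List Bool) :
    ∀ (ns lg cg ag : Int), 0 ≤ ag →
    (fun s : Int × Int × Int × Int => (s.1, max s.2.1 s.2.2.1, s.2.2.2))
        (l.foldl streaksStep (ns, lg, cg, ag)) =
      (ns + (if ag = 0 then ((l.takeWhile (fun f => !f)).length : Int) else 0),
       max lg (pvGapM cg l),
       ag + (l.count true : Int)) := by
  induction l with
  | nil =>
    intro ns lg cg ag _
    simp [pvGapM]
  | cons f t ih =>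
    intro ns lg cg ag hag
    cases f with
    | true =>
      rw [List.foldl_cons, streaksStep_true]
      dsimp only
      have h := ih ns (if cg > lg then cg else lg) 0 (ag + 1) (by omega)
      dsimp only at h
      rw [h]
      refine Prod.ext ?_ (Prod.ext ?_ ?_)
      · simp only [List.takeWhile_cons, Bool.not_true]
        have h1 : ¬ (ag + 1 = 0) := by omega
        simp [h1]
      · simp only [pvGapM, if_true]
        split_ifs with h1 <;> omega
      · simp
        omega
    | false =>
      rw [List.foldl_cons, streaksStep_false]
      dsimp only
      have h := ih (if ag = 0 then ns + 1 else ns) lg (cg + 1) ag hag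
      dsimp only at h
      rw [h]
      refine Prod.ext ?_ (Prod.ext ?_ ?_)
      · simp only [List.takeWhile_cons, Bool.not_false]
        split_ifs <;> (simp; try omega)
      · simp only [pvGapM, Bool.false_eq_true, if_false]
      · simp


-- B's longest-gap pass computes pvGapM.
theorem pvGap_foldl_eq (l : List Bool) :
    ∀ (b c : Int), 0 ≤ c → c ≤ b →
    (l.foldl pvGapStep (b, c)).1 = max b (pvGapM c l) := by
  induction l with
  | nil =>
    intro b c _ hcb
    simp [pvGapM]
    omega
  | cons f t ih =>
    intro b c hc hcb
    cases f with
    | true =>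
      rw [List.foldl_cons, pvGapStep_true]
      have h := ih (max b 0) 0 (le_refl 0) (by omega)
      rw [h]
      simp only [pvGapM, if_true]
      omega
    | false =>
      rw [List.foldl_cons, pvGapStep_false]
      have h := ih (max b (c + 1)) (c + 1) (by omega) (by omega)
      rw [h]
      simp only [pvGapM, Bool.false_eq_true, if_false]
      have := pvGapM_le t (c + 1)
      omega

-- B's first-audited-index pass computes the length of the leading unaudited prefix.
theorem pvNewest_eq (l : List Bool) :
    (if l.contains true then (((PySem.List.index? l true).getD 0 : Nat) : Int) else (l.length : Int)) =
      ((l.takeWhile (fun f => !f)).length : Int) := by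
  induction l with
  | nil => simp
  | cons f t ih =>
    cases f with
    | true =>
      rw [PySem.List.index?_cons_self]
      simp
    | false =>
      have hcons : PySem.List.index? (false :: t) true = (PySem.List.index? t true).map (· + 1) :=
        PySem.List.index?_cons_of_ne _ Bool.false_ne_true
      have hcond : (false :: t).contains true = t.contains true := by simp
      have htw : List.takeWhile (fun f => !f) (false :: t) = false :: List.takeWhile (fun f => !f) t := by
        simp
      rw [hcons, hcond, htw]
      by_cases hmem : t.contains true = true
      · have hsome : (PySem.List.index? t true).isSome = true := by
          rw [PySem.List.index?_isSome_iff]; simpa using hmem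
        obtain ⟨k, hk⟩ := Option.isSome_iff_exists.mp hsome
        rw [if_pos hmem, hk] at ih ⊢
        simp only [Option.map_some, Option.getD_some, List.length_cons] at ih ⊢
        push_cast at ih ⊢
        omega
      · rw [if_neg hmem] at ih ⊢
        simp only [List.length_cons] at ih ⊢
        push_cast at ih ⊢
        omega

theorem pvGapM_nonneg (l : List Bool) : 0 ≤ pvGapM 0 l :=
  pvGapM_le l 0

-- ===== VERDICT (by name: the statement is the Claim_ definition above) =====
theorem streaks_spec : Claim_equal_streaks := by
  intro commits reports _ _
  unfold Spec_streaks
  have hA : streaks commits reports =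
      (fun s : Int × Int × Int × Int => (s.1, max s.2.1 s.2.2.1, s.2.2.2))
        (List.foldl (fun s c => streaksStep s (pvAud reports c)) (0, 0, 0, 0) commits) := rfl
  have hB : streaks_alt commits reports =
      ((if (commits.map (pvAud reports)).contains true
          then (((PySem.List.index? (commits.map (pvAud reports)) true).getD 0 : Nat) : Int)
          else ((commits.map (pvAud reports)).length : Int)),
        (List.foldl pvGapStep (0, 0) (commits.map (pvAud reports))).1,
        ((commits.map (pvAud reports)).count true : Int)) := rfl
  rw [hA, hB]
  rw [show (List.foldl (fun s c => streaksStep s (pvAud reports c))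
        (((0 : Int), (0 : Int), (0 : Int), (0 : Int))) commits) =
      List.foldl streaksStep (0, 0, 0, 0) (commits.map (pvAud reports)) from
    (List.foldl_map).symm]
  rw [streaks_foldl_eq (commits.map (pvAud reports)) 0 0 0 0 (le_refl 0)]
  rw [pvGap_foldl_eq (commits.map (pvAud reports)) 0 0 (le_refl 0) (le_refl 0)]
  rw [pvNewest_eq]
  have := pvGapM_nonneg (commits.map (pvAud reports))
  refine Prod.ext ?_ (Prod.ext ?_ ?_) <;> simp
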